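-- pv_equiv track=rewrite | github.com/beeracademy/discord-bot | bot.py | code_block_escape
-- ===== SOURCE A (Python) =====
-- def code_block_escape(s):
--     ns = ""
--     count = 0
--     for c in s:
--         if c == "`":
--             count += 1
--             if count == 3:
--                 ns += "\N{ZERO WIDTH JOINER}"
--                 count = 1
--         else:
--             count = 0
--
--         ns += c
--     return ns
-- ===== SOURCE B (Python) =====
-- def code_block_escape(s):
--     # Run-based: scan maximal runs of backticks, emit each run as chunks of 2 joined by a ZWJ.
--     ZWJ = "\N{ZERO WIDTH JOINER}"
--     out = []
--     i = 0
--     n = len(s)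
--     while i < n:
--         if s[i] == "`":
--             j = i
--             while j < n and s[j] == "`":
--                 j += 1
--             run = s[i:j]
--             out.append(ZWJ.join(run[k:k + 2] for k in range(0, len(run), 2)))
--             i = j
--         else:
--             out.append(s[i])
--             i += 1
--     return "".join(out)
-- ===== Notes on version B (the rewrite author's own statement) =====
-- stated objective: alternative
-- what changed: Replaces the per-character counter state machine by a run-based scan: each maximal run of backticks is split into chunks of two joined by a zero-width joiner.
import Mathlib
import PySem

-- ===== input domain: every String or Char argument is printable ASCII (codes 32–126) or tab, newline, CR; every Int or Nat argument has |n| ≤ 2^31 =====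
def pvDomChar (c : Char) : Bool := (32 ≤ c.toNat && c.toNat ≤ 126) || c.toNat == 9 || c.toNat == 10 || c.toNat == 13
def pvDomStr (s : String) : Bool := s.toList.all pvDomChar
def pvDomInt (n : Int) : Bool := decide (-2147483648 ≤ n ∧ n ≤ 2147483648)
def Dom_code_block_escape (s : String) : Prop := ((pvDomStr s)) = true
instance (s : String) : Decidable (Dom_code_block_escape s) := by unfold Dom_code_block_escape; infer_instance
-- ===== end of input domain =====

-- B replaces A's per-character counter state machine by a run-based scan (chunks of 2 per backtick run, joined by a ZWJ); alternative decomposition, same cost.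

-- U+200D ZERO WIDTH JOINER
def pvZWJ : Char := Char.ofNat 0x200D

-- ===== PORT A =====
-- A: single pass, counter of consecutive backticks, inserts a ZWJ before every third one.
def pvAStep (st : List Char × Int) (c : Char) : List Char × Int :=
  if c = '`' then
    let count := st.2 + 1
    if count = 3 then (st.1 ++ [pvZWJ, c], 1)
    else (st.1 ++ [c], count)
  else (st.1 ++ [c], 0)

def code_block_escape (s : String) : String :=
  String.mk (s.toList.foldl pvAStep ([], 0)).1

-- ===== PORT B =====
-- B: scan maximal backtick runs; each run becomes its chunks of two joined by a ZWJ.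
def pvChunks2 : List Char → List (List Char)
  | [] => []
  | [a] => [[a]]
  | a :: b :: rest => [a, b] :: pvChunks2 rest

-- ZWJ.join
def pvJoinZWJ : List (List Char) → List Char
  | [] => []
  | [x] => x
  | x :: y :: rest => x ++ pvZWJ :: pvJoinZWJ (y :: rest)

def pvBGo : List Char → List Char
  | [] => []
  | c :: rest =>
    if h : c = '`' then
      pvJoinZWJ (pvChunks2 (List.takeWhile (· = '`') (c :: rest)))
        ++ pvBGo (List.dropWhile (· = '`') (c :: rest))
    else c :: pvBGo rest
termination_by l => l.length
decreasing_by
  · simp only [List.dropWhile, h]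
    simp only [decide_true]
    exact Nat.lt_succ_of_le (List.length_dropWhile_le _ _)
  · simp

def code_block_escape_alt (s : String) : String :=
  String.mk (pvBGo s.toList)

-- ===== PRECONDITION & SPEC =====
def Spec_code_block_escape (s : String) (out : String) : Prop := out = code_block_escape_alt s
instance (s : String) (out : String) : Decidable (Spec_code_block_escape s out) := by unfold Spec_code_block_escape; infer_instance

-- ===== CLAIM (what is proved, stated in full; the proofs are below) =====
def Claim_equal_code_block_escape : Prop := ∀ (s : String), Dom_code_block_escape s → Spec_code_block_escape s (code_block_escape s)

-- ===== LEMMAS AND PROOFS =====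

-- A's loop, suffix form: output appended after the accumulator, given current count k.
def pvAGo : List Char → Int → List Char
  | [], _ => []
  | c :: t, k =>
    if c = '`' then
      if k + 1 = 3 then pvZWJ :: c :: pvAGo t 1 else c :: pvAGo t (k + 1)
    else c :: pvAGo t 0

theorem pvAGo_foldl (l : List Char) : ∀ (acc : List Char) (k : Int),
    (l.foldl pvAStep (acc, k)).1 = acc ++ pvAGo l k := by
  induction l with
  | nil => intro acc k; simp [pvAGo]
  | cons c t ih =>
    intro acc k
    simp only [List.foldl_cons, pvAStep, pvAGo]
    by_cases hc : c = '`'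
    · simp only [hc, if_pos rfl]
      by_cases h3 : k + 1 = 3
      · simp [h3, ih]
      · simp [h3, ih]
    · simp [hc, ih]

-- a list whose head is not a backtick (or empty)
def pvNoTick (l : List Char) : Prop := l.head? ≠ some '`'

theorem pvAGo_noTick (l : List Char) (h : pvNoTick l) (k : Int) :
    pvAGo l k = pvAGo l 0 := by
  cases l with
  | nil => rfl
  | cons c t =>
    have hc : c ≠ '`' := by
      intro hc; exact h (by simp [List.head?, hc])
    simp [pvAGo, hc]

-- escaped form of a run of m backticks
def pvCS : Nat → List Char
  | 0 => []
  | 1 => ['`']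
  | m + 2 => '`' :: '`' :: (if m = 0 then [] else pvZWJ :: pvCS m)

theorem pvChunks2_ne_nil (l : List Char) (h : l ≠ []) : pvChunks2 l ≠ [] := by
  match l with
  | [a] => simp [pvChunks2]
  | a :: b :: rest => simp [pvChunks2]

theorem pvJoin_chunks_replicate : ∀ m : Nat,
    pvJoinZWJ (pvChunks2 (List.replicate m '`')) = pvCS m := by
  intro m
  induction m using Nat.strong_induction_on with
  | _ m ih =>
    match m with
    | 0 => rfl
    | 1 => rfl
    | m + 2 =>
      have hrep : List.replicate (m + 2) '`' = '`' :: '`' :: List.replicate m '`' := by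
        simp [List.replicate]
      rw [hrep]
      simp only [pvChunks2]
      by_cases hm : m = 0
      · subst hm; rfl
      · have hne : pvChunks2 (List.replicate m '`') ≠ [] :=
          pvChunks2_ne_nil _ (by simp [hm])
        obtain ⟨y, rest, hy⟩ := List.exists_cons_of_ne_nil hne
        rw [hy]
        simp only [pvJoinZWJ]
        rw [← hy, ih m (by omega)]
        simp [pvCS, hm]

-- A on a backtick run starting in state 2 ("just emitted a pair")
theorem pvAGo_run2 (rest : List Char) (hr : pvNoTick rest) : ∀ m : Nat,
    pvAGo (List.replicate m '`' ++ rest) 2 =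
      (if m = 0 then pvAGo rest 0 else pvZWJ :: (pvCS m ++ pvAGo rest 0)) := by
  intro m
  induction m using Nat.strong_induction_on with
  | _ m ih =>
    match m with
    | 0 => simpa using pvAGo_noTick rest hr 2
    | 1 =>
      simp only [List.replicate, List.nil_append, List.cons_append, List.singleton_append]
      simp [pvAGo, pvCS, pvAGo_noTick rest hr 1]
    | m + 2 =>
      have hrep : List.replicate (m + 2) '`' = '`' :: '`' :: List.replicate m '`' := by
        simp [List.replicate]
      rw [hrep]
      simp only [List.cons_append]
      simp only [pvAGo, if_pos rfl]
      norm_num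
      rw [ih m (by omega)]
      by_cases hm : m = 0
      · subst hm; simp [pvCS]
      · simp [pvCS, hm]

-- A on a backtick run starting in state 0
theorem pvAGo_run0 (m : Nat) (rest : List Char) (hr : pvNoTick rest) :
    pvAGo (List.replicate m '`' ++ rest) 0 = pvCS m ++ pvAGo rest 0 := by
  match m with
  | 0 => simp [pvCS]
  | 1 =>
    simp only [List.replicate, List.nil_append, List.cons_append, List.singleton_append]
    simp [pvAGo, pvCS, pvAGo_noTick rest hr 1]
  | m + 2 =>
    have hrep : List.replicate (m + 2) '`' = '`' :: '`' :: List.replicate m '`' := by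
      simp [List.replicate]
    rw [hrep]
    simp only [List.cons_append]
    simp only [pvAGo, if_pos rfl]
    norm_num
    rw [pvAGo_run2 rest hr m]
    by_cases hm : m = 0
    · subst hm; simp [pvCS]
    · simp [pvCS, hm]

-- main equivalence on char lists
theorem pvAGo_eq_pvBGo : ∀ (l : List Char), pvAGo l 0 = pvBGo l := by
  have key : ∀ (n : Nat) (l : List Char), l.length ≤ n → pvAGo l 0 = pvBGo l := by
    intro n
    induction n with
    | zero =>
      intro l hl
      have : l = [] := List.eq_nil_of_length_eq_zero (Nat.le_zero.mp hl)
      subst this; simp [pvAGo, pvBGo]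
    | succ n ih =>
      intro l hl
      cases l with
      | nil => simp [pvAGo, pvBGo]
      | cons c t =>
        by_cases hc : c = '`'
        · subst hc
          set rest := List.dropWhile (· = '`') ('`' :: t) with hrest
          set tk := List.takeWhile (· = '`') ('`' :: t) with htk
          have htick : ∀ b ∈ tk, b = '`' := by
            intro b hb
            have := List.mem_takeWhile_imp hb
            simpa using this
          have hrepl : tk = List.replicate tk.length '`' := List.eq_replicate_of_mem htick
          have hdecomp : ('`' :: t) = List.replicate tk.length '`' ++ rest := by
            rw [← hrepl, htk, hrest]
            exact (List.takeWhile_append_dropWhile).symm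
          have hnt : pvNoTick rest := by
            intro hhead
            have hmatch := List.head?_dropWhile_not (fun x => decide (x = '`')) ('`' :: t)
            rw [← hrest] at hmatch
            rw [hhead] at hmatch
            simp at hmatch
          have hm1 : 1 ≤ tk.length := by
            have : tk = '`' :: List.takeWhile (· = '`') t := by
              rw [htk, List.takeWhile_cons_of_pos (by simp)]
            rw [this]; simp
          have hlen : rest.length ≤ n := by
            have hll := congrArg List.length hdecomp
            simp only [List.length_append, List.length_replicate, List.length_cons] at hll
            simp only [List.length_cons] at hl
            omega
          have hA : pvAGo ('`' :: t) 0 = pvCS tk.length ++ pvAGo rest 0 := by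
            rw [hdecomp]; exact pvAGo_run0 _ _ hnt
          have hB : pvBGo ('`' :: t) = pvJoinZWJ (pvChunks2 tk) ++ pvBGo rest := by
            rw [pvBGo, dif_pos rfl]
          rw [hA, hB, hrepl, pvJoin_chunks_replicate]
          rw [List.length_replicate]
          rw [ih rest hlen]
        · rw [pvBGo, dif_neg hc]
          simp only [pvAGo]
          rw [if_neg hc]
          congr 1
          exact ih t (by simpa using Nat.le_of_succ_le_succ (by simpa using hl))
  intro l; exact key l.length l (le_refl _)

-- ===== VERDICT (by name: the statement is the Claim_ definition above) =====
theorem code_block_escape_spec : Claim_equal_code_block_escape := by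
  intro s _
  unfold Spec_code_block_escape code_block_escape code_block_escape_alt
  rw [pvAGo_foldl, pvAGo_eq_pvBGo]
  simp
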